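-- pv_equiv track=rewrite | github.com/alexs42/BioCodeTeacher | backend/services/code_parser.py | get_line_with_context
-- ===== SOURCE A (Python) =====
-- from typing import List, Tuple
--
-- def get_line_with_context(
--     content: str,
--     line_number: int,
--     context_lines: int = 10
-- ) -> Tuple[str, str, str]:
--     """
--     Extract a line and its surrounding context.
--
--     Args:
--         content: Full file content
--         line_number: 1-indexed line number
--         context_lines: Number of lines before/after to include
--
--     Returns:
--         Tuple of (context_before, target_line, context_after)
--     """
--     lines = content.splitlines()
--     total_lines = len(lines)
--
--     # Convert to 0-indexed
--     idx = line_number - 1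
--
--     if idx < 0 or idx >= total_lines:
--         raise ValueError(f"Line {line_number} out of range (file has {total_lines} lines)")
--
--     # Extract target line
--     target_line = lines[idx]
--
--     # Extract context before
--     start = max(0, idx - context_lines)
--     context_before = "\n".join(
--         f"{i + 1}: {lines[i]}" for i in range(start, idx)
--     )
--
--     # Extract context after
--     end = min(total_lines, idx + context_lines + 1)
--     context_after = "\n".join(
--         f"{i + 1}: {lines[i]}" for i in range(idx + 1, end)
--     )
--
--     return context_before, target_line, context_after
-- ===== SOURCE B (Python) =====
-- def get_line_with_context(
--     content: str,
--     line_number: int,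
--     context_lines: int = 10
-- ):
--     """Extract a line and its numbered surrounding context.
--
--     Alternative decomposition: a single pass over all lines with three
--     accumulators (before parts, target, after parts), classifying each
--     line by its signed distance to the target instead of A's staged
--     index-range loops.
--     """
--     lines = content.splitlines()
--     idx = line_number - 1
--     if idx < 0 or idx >= len(lines):
--         raise ValueError(f"Line {line_number} out of range (file has {len(lines)} lines)")
--
--     before_parts = []
--     after_parts = []
--     target = ""
--     for i, line in enumerate(lines):
--         d = i - idx
--         if d == 0:
--             target = line
--         elif -context_lines <= d < 0:
--             before_parts.append(f"{i + 1}: {line}")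
--         elif 0 < d <= context_lines:
--             after_parts.append(f"{i + 1}: {line}")
--     return "\n".join(before_parts), target, "\n".join(after_parts)
-- ===== Notes on version B (the rewrite author's own statement) =====
-- stated objective: alternative
-- what changed: B replaces A's two targeted index-range loops with one single pass over enumerate(lines) that classifies every line by its signed distance to the target into three accumulators (before parts, target, after parts) and joins at the end.
import Mathlib
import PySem

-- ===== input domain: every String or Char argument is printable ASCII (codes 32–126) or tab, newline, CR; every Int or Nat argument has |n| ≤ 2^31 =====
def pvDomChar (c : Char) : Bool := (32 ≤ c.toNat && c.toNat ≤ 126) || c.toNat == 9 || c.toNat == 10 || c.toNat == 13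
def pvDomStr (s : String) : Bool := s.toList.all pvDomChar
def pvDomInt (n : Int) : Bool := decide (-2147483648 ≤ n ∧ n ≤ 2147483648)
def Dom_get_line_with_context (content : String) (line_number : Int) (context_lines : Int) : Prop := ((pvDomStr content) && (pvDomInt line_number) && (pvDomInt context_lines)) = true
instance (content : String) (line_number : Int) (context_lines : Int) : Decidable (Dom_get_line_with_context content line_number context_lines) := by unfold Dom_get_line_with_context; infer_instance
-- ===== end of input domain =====

-- B makes one single pass over all lines, classifying each by its signed distance to the
-- target into three accumulators, instead of A's two targeted index-range loops (objective: alternative decomposition).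

-- ===== PORT A =====
def get_line_with_context (content : String) (line_number : Int) (context_lines : Int) : String × String × String :=
  let lines := PySem.Str.splitlines content
  let total : Int := lines.length
  let idx := line_number - 1
  if idx < 0 ∨ idx ≥ total then ("", "", "")  -- Python raises ValueError here; excluded by Pre_
  else
    let target := PySem.List.pyGetD lines idx ""
    let start := max 0 (idx - context_lines)
    let before := PySem.Str.join "\n"
      ((PySem.List.pyRange start idx 1).map
        (fun i => PySem.Int.toStr (i + 1) ++ ": " ++ PySem.List.pyGetD lines i ""))
    let stop := min total (idx + context_lines + 1)
    let after := PySem.Str.join "\n"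
      ((PySem.List.pyRange (idx + 1) stop 1).map
        (fun i => PySem.Int.toStr (i + 1) ++ ": " ++ PySem.List.pyGetD lines i ""))
    (before, target, after)

-- ===== PORT B =====
-- one iteration of B's single loop: classify line p by its signed distance p.1 - idx
def glwcStep (idx c : Int) (st : List String × String × List String) (p : Int × String) :
    List String × String × List String :=
  if p.1 - idx = 0 then (st.1, p.2, st.2.2)
  else if -c ≤ p.1 - idx ∧ p.1 - idx < 0 then
    (st.1 ++ [PySem.Int.toStr (p.1 + 1) ++ ": " ++ p.2], st.2.1, st.2.2)
  else if 0 < p.1 - idx ∧ p.1 - idx ≤ c then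
    (st.1, st.2.1, st.2.2 ++ [PySem.Int.toStr (p.1 + 1) ++ ": " ++ p.2])
  else st

def get_line_with_context_alt (content : String) (line_number : Int) (context_lines : Int) : String × String × String :=
  let lines := PySem.Str.splitlines content
  let idx := line_number - 1
  if idx < 0 ∨ idx ≥ (lines.length : Int) then ("", "", "")  -- Python raises ValueError here; excluded by Pre_
  else
    let st := (PySem.List.enumerate lines 0).foldl (glwcStep idx context_lines) ([], "", [])
    (PySem.Str.join "\n" st.1, st.2.1, PySem.Str.join "\n" st.2.2)

-- ===== PRECONDITION & SPEC =====
-- Pre_ excludes exactly the inputs where both Pythons raise ValueError: a 1-indexed line number out of range.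
def Pre_get_line_with_context (content : String) (line_number : Int) (context_lines : Int) : Prop :=
  1 ≤ line_number ∧ line_number ≤ (PySem.Str.splitlines content).length

instance (content : String) (line_number : Int) (context_lines : Int) : Decidable (Pre_get_line_with_context content line_number context_lines) := by unfold Pre_get_line_with_context; infer_instance

def pvWitness_get_line_with_context : String × Int × Int := ("a\nb\nc", 2, 1)

def Spec_get_line_with_context (content : String) (line_number : Int) (context_lines : Int) (out : String × String × String) : Prop := out = get_line_with_context_alt content line_number context_lines
instance (content : String) (line_number : Int) (context_lines : Int) (out : String × String × String) : Decidable (Spec_get_line_with_context content line_number context_lines out) := by unfold Spec_get_line_with_context; infer_instance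

-- ===== CLAIM (what is proved, stated in full; the proofs are below) =====
def Claim_equal_get_line_with_context : Prop := ∀ (content : String) (line_number : Int) (context_lines : Int), Dom_get_line_with_context content line_number context_lines → Pre_get_line_with_context content line_number context_lines → Spec_get_line_with_context content line_number context_lines (get_line_with_context content line_number context_lines)

-- ===== LEMMAS AND PROOFS =====

-- B's fold distributes into its three accumulators: filtered before/after parts and the last target hit.
theorem glwc_foldl_char (idx c : Int) (l : List (Int × String))
    (B : List String) (T : String) (A : List String) :
    l.foldl (glwcStep idx c) (B, T, A) =
      (B ++ (l.filter (fun p => decide (-c ≤ p.1 - idx ∧ p.1 - idx < 0))).map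
          (fun p => PySem.Int.toStr (p.1 + 1) ++ ": " ++ p.2),
       (l.filterMap (fun p => if p.1 - idx = 0 then some p.2 else none)).getLastD T,
       A ++ (l.filter (fun p => decide (0 < p.1 - idx ∧ p.1 - idx ≤ c))).map
          (fun p => PySem.Int.toStr (p.1 + 1) ++ ": " ++ p.2)) := by
  induction l generalizing B T A with
  | nil => simp
  | cons p rest ih =>
    simp only [List.foldl_cons, List.filter_cons, List.filterMap_cons]
    by_cases h0 : p.1 - idx = 0
    · have hstep : glwcStep idx c (B, T, A) p = (B, p.2, A) := by
        unfold glwcStep; rw [if_pos h0]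
      rw [hstep, ih]
      have e1 : (decide (-c ≤ p.1 - idx ∧ p.1 - idx < 0)) = false := by simp; omega
      have e2 : (decide (0 < p.1 - idx ∧ p.1 - idx ≤ c)) = false := by simp; omega
      have e3 : (if p.1 - idx = 0 then some p.2 else none) = some p.2 := if_pos h0
      rw [e1, e2, e3]
      refine Prod.ext ?_ (Prod.ext ?_ ?_)
      · simp
      · show (List.filterMap _ rest).getLastD p.2
            = ((p.2 :: List.filterMap (fun p => if p.1 - idx = 0 then some p.2 else none) rest).getLastD T)
        exact List.getLastD_cons.symm
      · simp
    · by_cases hb : -c ≤ p.1 - idx ∧ p.1 - idx < 0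
      · have hstep : glwcStep idx c (B, T, A) p
            = (B ++ [PySem.Int.toStr (p.1 + 1) ++ ": " ++ p.2], T, A) := by
          unfold glwcStep; rw [if_neg h0, if_pos hb]
        rw [hstep, ih]
        have hbf : ¬ (0 < p.1 - idx ∧ p.1 - idx ≤ c) := by omega
        simp [hb, h0]
        rw [if_neg (by omega)]
      · by_cases ha : 0 < p.1 - idx ∧ p.1 - idx ≤ c
        · have hstep : glwcStep idx c (B, T, A) p
              = (B, T, A ++ [PySem.Int.toStr (p.1 + 1) ++ ": " ++ p.2]) := by
            unfold glwcStep; rw [if_neg h0, if_neg hb, if_pos ha]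
          rw [hstep, ih]
          simp [h0]
          refine ⟨by rw [if_neg (by omega)], ?_⟩
          rw [if_pos (by omega)]
          simp
        · have hstep : glwcStep idx c (B, T, A) p = (B, T, A) := by
            unfold glwcStep; rw [if_neg h0, if_neg hb, if_neg ha]
          rw [hstep, ih]
          simp [h0]
          constructor
          · rw [if_neg (by omega)]
          · rw [if_neg (by omega)]

-- Filtering range(0, n) by a window predicate yields exactly range(a, b).
theorem filter_pyRange_window (n : Nat) (a b : Int) (p : Int → Bool)
    (ha : 0 ≤ a) (hb : b ≤ (n : Int))
    (hp : ∀ i : Int, 0 ≤ i → i < (n : Int) → p i = (decide (a ≤ i) && decide (i < b))) :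
    (PySem.List.pyRange 0 (n : Int) 1).filter p = PySem.List.pyRange a b 1 := by
  induction n generalizing a b with
  | zero =>
    rw [PySem.List.pyRange_one_eq_nil (by omega), PySem.List.pyRange_one_eq_nil (by omega)]
    simp
  | succ n ih =>
    have hsplit : PySem.List.pyRange 0 ((n + 1 : Nat) : Int) 1
        = PySem.List.pyRange 0 (n : Int) 1 ++ [(n : Int)] := by
      push_cast
      exact PySem.List.pyRange_one_succ_right (by omega)
    rw [hsplit, List.filter_append]
    by_cases hbn : b ≤ (n : Int)
    · rw [ih a b ha hbn (fun i h1 h2 => hp i h1 (by omega))]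
      have hn : p (n : Int) = false := by
        rw [hp (n : Int) (by omega) (by push_cast; omega)]
        simp; omega
      simp [hn]
    · have hbe : b = (n : Int) + 1 := by push_cast at hb; omega
      by_cases han : a ≤ (n : Int)
      · have hstep : ∀ i : Int, 0 ≤ i → i < (n : Int) → p i = (decide (a ≤ i) && decide (i < (n : Int))) := by
          intro i h1 h2
          rw [hp i h1 (by omega)]
          have e1 : decide (i < b) = true := by simp; omega
          have e2 : decide (i < (n : Int)) = true := by simp; omega
          rw [e1, e2]
        rw [ih a (n : Int) ha le_rfl hstep]
        have hn : p (n : Int) = true := by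
          rw [hp (n : Int) (by omega) (by push_cast; omega)]
          simp; omega
        have hf : List.filter p [(n : Int)] = [(n : Int)] := by simp [hn]
        rw [hf, hbe, ← PySem.List.pyRange_one_succ_right han]
      · have hstep : ∀ i : Int, 0 ≤ i → i < (n : Int) → p i = (decide (a ≤ i) && decide (i < 0)) := by
          intro i h1 h2
          rw [hp i h1 (by omega)]
          have e1 : decide (a ≤ i) = false := by simp; omega
          rw [e1]; simp
        rw [ih a 0 ha (by omega) hstep]
        have hn : p (n : Int) = false := by
          rw [hp (n : Int) (by omega) (by push_cast; omega)]
          simp; omega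
        rw [PySem.List.pyRange_one_eq_nil (a := a) (b := 0) (by omega),
            PySem.List.pyRange_one_eq_nil (a := a) (b := b) (by omega)]
        simp [hn]

-- The single target hit: filterMap over range(0, n) keyed at idx yields exactly [g idx].
theorem filterMap_pyRange_single (n : Nat) (idx : Int) (g : Int → String)
    (h1 : 0 ≤ idx) (h2 : idx < (n : Int)) :
    (PySem.List.pyRange 0 (n : Int) 1).filterMap
        (fun j => if j - idx = 0 then some (g j) else none) = [g idx] := by
  rw [PySem.List.pyRange_one_append 0 idx (n : Int) h1 (by omega),
      PySem.List.pyRange_one_append idx (idx + 1) (n : Int) (by omega) (by omega),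
      PySem.List.pyRange_one_singleton]
  simp only [List.filterMap_append]
  have e1 : (PySem.List.pyRange 0 idx 1).filterMap
      (fun j => if j - idx = 0 then some (g j) else none) = [] := by
    rw [List.filterMap_eq_nil_iff]
    intro j hj
    rw [PySem.List.mem_pyRange_one] at hj
    rw [if_neg (by omega)]
  have e2 : (PySem.List.pyRange (idx + 1) (n : Int) 1).filterMap
      (fun j => if j - idx = 0 then some (g j) else none) = [] := by
    rw [List.filterMap_eq_nil_iff]
    intro j hj
    rw [PySem.List.mem_pyRange_one] at hj
    rw [if_neg (by omega)]
  rw [e1, e2]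
  simp

-- ===== VERDICT (by name: the statement is the Claim_ definition above) =====
theorem get_line_with_context_spec : Claim_equal_get_line_with_context := by
  intro content line_number context_lines _ hpre
  obtain ⟨h1, h2⟩ := hpre
  unfold Spec_get_line_with_context get_line_with_context get_line_with_context_alt
  simp only []
  set lines := PySem.Str.splitlines content with hl
  set n := lines.length with hn
  have hidx : ¬ (line_number - 1 < 0 ∨ line_number - 1 ≥ (n : Int)) := by omega
  rw [if_neg hidx, if_neg hidx]
  rw [PySem.List.enumerate_eq_map_pyRange lines ""]
  rw [glwc_foldl_char]
  have hlen : PySem.List.len lines = (n : Int) := by simp [PySem.List.len, ← hn]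
  rw [hlen]
  simp only [List.filter_map, List.filterMap_map, List.map_map, List.nil_append]
  set idx := line_number - 1 with hidef
  refine Prod.ext ?_ (Prod.ext ?_ ?_)
  · -- context_before
    rw [show ((fun p : Int × String => decide (-context_lines ≤ p.1 - idx ∧ p.1 - idx < 0)) ∘
          (fun j => (j, PySem.List.pyGetD lines j "")))
        = (fun j : Int => decide (-context_lines ≤ j - idx ∧ j - idx < 0)) from rfl]
    rw [filter_pyRange_window n (max 0 (idx - context_lines)) idx
        (fun j : Int => decide (-context_lines ≤ j - idx ∧ j - idx < 0))
        (by omega) (by omega)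
        (by intro i hi1 hi2; simp only [← Bool.decide_and, decide_eq_decide]; omega)]
    rfl
  · -- target line
    rw [show ((fun p : Int × String => if p.1 - idx = 0 then some p.2 else none) ∘
          (fun j => (j, PySem.List.pyGetD lines j "")))
        = (fun j : Int => if j - idx = 0 then some (PySem.List.pyGetD lines j "") else none) from rfl]
    rw [filterMap_pyRange_single n idx (fun j => PySem.List.pyGetD lines j "") (by omega) (by omega)]
    rfl
  · -- context_after
    rw [show ((fun p : Int × String => decide (0 < p.1 - idx ∧ p.1 - idx ≤ context_lines)) ∘
          (fun j => (j, PySem.List.pyGetD lines j "")))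
        = (fun j : Int => decide (0 < j - idx ∧ j - idx ≤ context_lines)) from rfl]
    rw [filter_pyRange_window n (idx + 1) (min (n : Int) (idx + context_lines + 1))
        (fun j : Int => decide (0 < j - idx ∧ j - idx ≤ context_lines))
        (by omega) (by omega)
        (by intro i hi1 hi2; simp only [← Bool.decide_and, decide_eq_decide]; omega)]
    rfl
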